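-- pv_equiv track=rewrite | github.com/Dong-Kyu-Lee7/programmers | 프로그래머스/0/181887. 홀수 vs 짝수/홀수 vs 짝수.py | solution
-- ===== SOURCE A (Python) =====
-- def solution(num_list):
--     even_num = 0
--     odd_num = 0
--
--     for x in range(len(num_list)):
--         if x % 2 == 0:
--             odd_num += num_list[x]
--         else:
--             even_num += num_list[x] # num_list[x+1] -> 2,1,6
--
--     if odd_num > even_num:
--         result = odd_num
--     else:
--         result = even_num
--     return result
-- ===== SOURCE B (Python) =====
-- def solution(num_list):
--     a = 0
--     b = 0
--     for x in reversed(num_list):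
--         a, b = x + b, a
--     return max(a, b)
-- ===== Notes on version B (the rewrite author's own statement) =====
-- stated objective: simpler
-- what changed: Replaces A's index loop over range(len) with a parity test and list indexing by a single swap-fold over the reversed list (the two running sums trade places at each element), returning max of the two sums instead of an if-chain.
import Mathlib
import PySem

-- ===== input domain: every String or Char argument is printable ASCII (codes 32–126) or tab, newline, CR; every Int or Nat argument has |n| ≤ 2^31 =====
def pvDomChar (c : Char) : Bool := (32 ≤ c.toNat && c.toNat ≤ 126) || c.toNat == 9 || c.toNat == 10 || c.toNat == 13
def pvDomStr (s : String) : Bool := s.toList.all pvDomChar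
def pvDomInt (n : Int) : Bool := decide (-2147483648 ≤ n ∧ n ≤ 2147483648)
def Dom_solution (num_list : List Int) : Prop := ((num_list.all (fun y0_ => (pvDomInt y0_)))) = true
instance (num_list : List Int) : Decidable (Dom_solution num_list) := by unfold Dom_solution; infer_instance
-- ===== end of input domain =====

-- B replaces A's indexed loop with parity branch by a single swap-fold over the
-- reversed list (no indices, no parity test); objective: simpler.

-- ===== PORT A =====
def solution (num_list : List Int) : Int :=
  let r := (PySem.List.pyRange 0 num_list.length 1).foldl
    (fun (acc : Int × Int) x =>
      if x % 2 == 0 then (acc.1, acc.2 + PySem.List.pyGetD num_list x 0)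
      else (acc.1 + PySem.List.pyGetD num_list x 0, acc.2))
    (0, 0)   -- acc = (even_num, odd_num)
  if r.2 > r.1 then r.2 else r.1

-- ===== PORT B =====
def solution_alt (num_list : List Int) : Int :=
  let p := num_list.reverse.foldl (fun (p : Int × Int) x => (x + p.2, p.1)) (0, 0)
  max p.1 p.2

-- ===== PRECONDITION & SPEC =====
def Spec_solution (num_list : List Int) (out : Int) : Prop := out = solution_alt num_list
instance (num_list : List Int) (out : Int) : Decidable (Spec_solution num_list out) := by unfold Spec_solution; infer_instance

-- ===== CLAIM (what is proved, stated in full; the proofs are below) =====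
def Claim_equal_solution : Prop := ∀ (num_list : List Int), Dom_solution num_list → Spec_solution num_list (solution num_list)

-- ===== LEMMAS AND PROOFS =====

-- closed form of B's swap-fold: F xs = (sum of even-position elements, sum of odd-position elements)
def pvF (xs : List Int) : Int × Int := xs.foldr (fun x p => (x + p.2, p.1)) (0, 0)

theorem pvF_alt (xs : List Int) :
    xs.reverse.foldl (fun (p : Int × Int) x => (x + p.2, p.1)) (0, 0) = pvF xs := by
  simp [pvF, List.foldl_reverse]

theorem pvF_nil : pvF [] = (0, 0) := rfl

theorem pvF_cons (a : Int) (t : List Int) : pvF (a :: t) = (a + (pvF t).2, (pvF t).1) := rfl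

-- A's loop, generalized over the accumulator
theorem loop_eq : ∀ (xs : List Int) (e o : Int),
    (PySem.List.pyRange 0 xs.length 1).foldl
      (fun (acc : Int × Int) x =>
        if x % 2 == 0 then (acc.1, acc.2 + PySem.List.pyGetD xs x 0)
        else (acc.1 + PySem.List.pyGetD xs x 0, acc.2))
      (e, o) = (e + (pvF xs).2, o + (pvF xs).1)
  | [], e, o => by simp [PySem.List.pyRange_one_eq_nil, pvF_nil]
  | [a], e, o => by
      rw [show ((([a] : List Int).length : Int) = 1) by simp,
        show PySem.List.pyRange 0 1 1 = [0] from PySem.List.pyRange_one_singleton 0]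
      simp [pvF]
  | a :: b :: t, e, o => by
      have hlen : ((a :: b :: t).length : Int) = (t.length : Int) + 2 := by
        simp; omega
      rw [hlen,
        PySem.List.pyRange_one_cons (by omega),
        PySem.List.pyRange_one_cons (by omega)]
      simp only [List.foldl_cons]
      have h0 : PySem.List.pyGetD (a :: b :: t) 0 0 = a := by
        simp [PySem.List.pyGetD_zero_cons]
      have h1 : PySem.List.pyGetD (a :: b :: t) 1 0 = b := by
        have := PySem.List.pyGetD_natCast (a :: b :: t) 1 0
        simpa using this
      have hshift :
          PySem.List.pyRange (0+1+1) ((t.length : Int) + 2) 1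
            = (PySem.List.pyRange 0 (t.length : Int) 1).map (fun j => j + 2) := by
        rw [PySem.List.pyRange_one, PySem.List.pyRange_one]
        simp only [show ((t.length : Int) + 2 - (0+1+1)) = (t.length : Int) - 0 by ring]
        rw [List.map_map]
        congr 1
        funext k
        simp; ring
      rw [hshift, List.foldl_map]
      norm_num [h0, h1]
      have hc : List.foldl
          (fun (x : Int × Int) y =>
            if 2 ∣ y then (x.1, x.2 + PySem.List.pyGetD (a :: b :: t) (y + 2) 0)
            else (x.1 + PySem.List.pyGetD (a :: b :: t) (y + 2) 0, x.2))
          (e + b, o + a) (PySem.List.pyRange 0 (t.length : Int) 1) = List.foldl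
          (fun (x : Int × Int) y =>
            if 2 ∣ y then (x.1, x.2 + PySem.List.pyGetD t y 0)
            else (x.1 + PySem.List.pyGetD t y 0, x.2))
          (e + b, o + a) (PySem.List.pyRange 0 (t.length : Int) 1) := by
        apply PySem.List.foldl_congr_mem
        intro acc j hj
        rw [PySem.List.mem_pyRange_one] at hj
        obtain ⟨k, hk⟩ : ∃ k : ℕ, j = (k : Int) := ⟨j.toNat, by omega⟩
        subst hk
        have hg : PySem.List.pyGetD (a :: b :: t) ((k : Int) + 2) 0
            = PySem.List.pyGetD t (k : Int) 0 := by
          rw [show ((k : Int) + 2) = ((k + 2 : ℕ) : Int) by push_cast; ring,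
            PySem.List.pyGetD_natCast, PySem.List.pyGetD_natCast]
          simp
        simp only [hg]
      rw [hc]
      have hrec := loop_eq t (e + b) (o + a)
      norm_num at hrec
      rw [hrec, pvF_cons, pvF_cons]
      simp only [Prod.mk.injEq]
      constructor <;> ring
  termination_by xs => xs.length

theorem solution_spec : Claim_equal_solution := by
  intro num_list _
  unfold Spec_solution solution solution_alt
  rw [loop_eq, pvF_alt]
  simp only []
  simp only [max_def]
  split_ifs <;> omega
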